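-- pv_equiv track=rewrite | github.com/mortersen/taohuashan | doc2docx_v3.py | delTempDocxFiles
-- ===== SOURCE A (Python) =====
-- def delTempDocxFiles(docxfiles):
--     temp = []
--     for i in docxfiles:
--         if '~$' in str(i):
--             temp.append(i)
--     for i in temp:
--         docxfiles.remove(i)
--     return docxfiles
-- ===== SOURCE B (Python) =====
-- def delTempDocxFiles(docxfiles):
--     docxfiles[:] = [i for i in docxfiles if '~$' not in str(i)]
--     return docxfiles
-- ===== Notes on version B (the rewrite author's own statement) =====
-- stated objective: simpler
-- what changed: Replaces the two-pass collect-matches-then-remove-each strategy (quadratic list.remove scans) with a single-pass complementary filter written back via slice assignment, preserving the in-place mutation.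
import Mathlib
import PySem

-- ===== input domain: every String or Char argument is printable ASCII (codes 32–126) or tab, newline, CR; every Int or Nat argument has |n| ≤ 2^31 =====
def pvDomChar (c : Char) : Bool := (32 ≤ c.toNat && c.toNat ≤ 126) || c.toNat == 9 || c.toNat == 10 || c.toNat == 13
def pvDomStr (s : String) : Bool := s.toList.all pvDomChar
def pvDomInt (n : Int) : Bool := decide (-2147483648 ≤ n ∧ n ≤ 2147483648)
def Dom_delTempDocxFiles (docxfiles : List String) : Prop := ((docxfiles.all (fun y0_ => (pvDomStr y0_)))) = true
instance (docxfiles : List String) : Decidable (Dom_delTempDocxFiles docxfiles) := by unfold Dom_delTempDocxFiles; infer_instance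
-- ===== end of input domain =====

-- ===== PORT A =====
-- A mutates its argument in place in Python; the equivalence proved here is about the RETURN value.
-- The none-branch of remove? corresponds to Python's ValueError and is unreachable here (each temp
-- element is still present when removed); it is proved unreachable in the lemmas below.
def delTempDocxFiles (docxfiles : List String) : List String :=
  let temp := docxfiles.foldl
    (fun temp i => if PySem.Str.isIn "~$" i then temp ++ [i] else temp) []
  temp.foldl
    (fun acc i =>
      match PySem.List.remove? acc i with
      | some l => l
      | none => acc) docxfiles

-- ===== PORT B =====
-- B: single-pass complementary filter (Source B's comprehension), same in-place semantics in Python.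
def delTempDocxFiles_alt (docxfiles : List String) : List String :=
  docxfiles.filter (fun i => !(PySem.Str.isIn "~$" i))

-- ===== PRECONDITION & SPEC =====
def Spec_delTempDocxFiles (docxfiles : List String) (out : List String) : Prop := out = delTempDocxFiles_alt docxfiles
instance (docxfiles : List String) (out : List String) : Decidable (Spec_delTempDocxFiles docxfiles out) := by unfold Spec_delTempDocxFiles; infer_instance

-- ===== CLAIM (what is proved, stated in full; the proofs are below) =====
def Claim_equal_delTempDocxFiles : Prop := ∀ (docxfiles : List String), Dom_delTempDocxFiles docxfiles → Spec_delTempDocxFiles docxfiles (delTempDocxFiles docxfiles)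

-- ===== LEMMAS AND PROOFS =====

-- the body of A's second loop
def pvStep (acc : List String) (i : String) : List String :=
  match PySem.List.remove? acc i with
  | some l => l
  | none => acc

theorem pvStep_cons_ne (a : String) (acc : List String) (t : String) (h : a ≠ t) :
    pvStep (a :: acc) t = a :: pvStep acc t := by
  unfold pvStep
  rw [PySem.List.remove?_cons_of_ne acc h]
  cases PySem.List.remove? acc t <;> simp

theorem pvFoldl_cons_not_mem (a : String) (acc : List String) (ts : List String)
    (h : ∀ t ∈ ts, t ≠ a) :
    ts.foldl pvStep (a :: acc) = a :: ts.foldl pvStep acc := by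
  induction ts generalizing acc with
  | nil => rfl
  | cons t ts ih =>
    simp only [List.foldl_cons]
    rw [pvStep_cons_ne a acc t (fun e => h t (by simp) e.symm)]
    exact ih _ (fun x hx => h x (by simp [hx]))

theorem pvMain (p : String → Bool) (l : List String) :
    (l.filter p).foldl pvStep l = l.filter (fun x => !(p x)) := by
  induction l with
  | nil => rfl
  | cons a rest ih =>
    by_cases hp : p a = true
    · simp only [List.filter_cons, hp, if_pos, List.foldl_cons]
      have : pvStep (a :: rest) a = rest := by
        unfold pvStep; rw [PySem.List.remove?_cons_self]
      rw [this, ih]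
      simp

    · have hp' : p a = false := by simpa using hp
      simp only [List.filter_cons, hp', Bool.false_eq_true, if_false]
      rw [pvFoldl_cons_not_mem a rest (rest.filter p)
        (by intro t ht he; subst he; simp [List.mem_filter, hp'] at ht)]
      rw [ih]; simp

-- ===== VERDICT (by name: the statement is the Claim_ definition above) =====
theorem delTempDocxFiles_spec : Claim_equal_delTempDocxFiles := by
  intro docxfiles _
  unfold Spec_delTempDocxFiles delTempDocxFiles delTempDocxFiles_alt
  have h1 : docxfiles.foldl
      (fun temp i => if PySem.Str.isIn "~$" i then temp ++ [i] else temp) []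
      = docxfiles.filter (fun i => PySem.Str.isIn "~$" i) := by
    simpa using PySem.List.foldl_append_if (fun i => PySem.Str.isIn "~$" i) id docxfiles []
  rw [h1]
  show List.foldl pvStep docxfiles (List.filter (fun i => PySem.Str.isIn "~$" i) docxfiles)
      = List.filter (fun i => !PySem.Str.isIn "~$" i) docxfiles
  exact pvMain (fun i => PySem.Str.isIn "~$" i) docxfiles
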